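-- pv_equiv track=rewrite | github.com/JuuCarmona/algoritmos2024 | codigos python/funçoes.py/encaixa.py | encaixa
-- ===== SOURCE A (Python) =====
-- def encaixa(a, b):
--     def conta_digito(num):
--         conta = 0
--         while num > 0:
--             conta = conta + 1
--             num = num // 10
--         return conta
--
--     digitos_b = conta_digito(b)
--
--     digitos_a = a % (10 ** digitos_b)
--
--     if digitos_a == b:
--         return True
--     else:
--         return False
-- ===== SOURCE B (Python) =====
-- def encaixa(a, b):
--     # Peel matching trailing digits of a and b one at a time instead of
--     # counting b's digits and taking one big modulo.  A negative b can never
--     # be a digit suffix, so it does not fit.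
--     if b < 0:
--         return False
--     while b > 0:
--         if a % 10 != b % 10:
--             return False
--         a //= 10
--         b //= 10
--     return True
-- ===== Notes on version B (the rewrite author's own statement) =====
-- stated objective: alternative
-- what changed: B peels and compares the last digit of a and b in a single loop instead of first counting b's digits and then testing a single big modulo a % 10**k == b.
import Mathlib
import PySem

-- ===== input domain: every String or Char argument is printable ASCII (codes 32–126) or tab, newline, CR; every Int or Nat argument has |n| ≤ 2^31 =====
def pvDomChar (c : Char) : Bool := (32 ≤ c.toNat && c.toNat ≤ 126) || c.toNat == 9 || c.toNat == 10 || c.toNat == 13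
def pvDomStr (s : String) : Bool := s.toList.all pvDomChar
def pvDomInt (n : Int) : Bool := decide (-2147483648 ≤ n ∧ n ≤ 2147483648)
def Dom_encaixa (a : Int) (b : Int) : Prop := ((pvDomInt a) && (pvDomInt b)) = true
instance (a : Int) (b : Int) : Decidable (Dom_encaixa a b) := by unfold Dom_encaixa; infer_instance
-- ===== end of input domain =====

-- B replaces A's digit-count + single big modulo by one loop peeling the last
-- digit of a and b together (objective: alternative, same cost).

-- ===== PORT A =====
-- 'while num > 0: conta += 1; num //= 10' — count as Nat (conta is 0,1,2,…),
-- used only as the exponent of 10 ** digitos_b.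
def conta_digito (num : Int) : Nat :=
  if 0 < num then conta_digito (PySem.Int.floordiv num 10) + 1 else 0
termination_by num.toNat
decreasing_by
  rename_i h
  rw [PySem.Int.floordiv_eq_ediv_of_pos (by omega)]
  omega

def encaixa (a : Int) (b : Int) : Bool :=
  let digitos_b := conta_digito b
  let digitos_a := PySem.Int.mod a (10 ^ digitos_b)
  if digitos_a = b then true else false

-- ===== PORT B =====
def encaixa_peel (a : Int) (b : Int) : Bool :=
  if 0 < b then
    if PySem.Int.mod a 10 ≠ PySem.Int.mod b 10 then false
    else encaixa_peel (PySem.Int.floordiv a 10) (PySem.Int.floordiv b 10)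
  else true
termination_by b.toNat
decreasing_by
  rename_i h _
  rw [PySem.Int.floordiv_eq_ediv_of_pos (by omega)]
  omega

def encaixa_alt (a : Int) (b : Int) : Bool :=
  if b < 0 then false else encaixa_peel a b

-- ===== PRECONDITION & SPEC =====
def Spec_encaixa (a : Int) (b : Int) (out : Bool) : Prop := out = encaixa_alt a b
instance (a : Int) (b : Int) (out : Bool) : Decidable (Spec_encaixa a b out) := by unfold Spec_encaixa; infer_instance

-- ===== CLAIM (what is proved, stated in full; the proofs are below) =====
def Claim_equal_encaixa : Prop := ∀ (a : Int) (b : Int), Dom_encaixa a b → Spec_encaixa a b (encaixa a b)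

-- ===== LEMMAS AND PROOFS =====

-- b < 10 ^ (number of digits of b), for b ≥ 0.
theorem lt_pow_conta (b : Int) (hb : 0 ≤ b) : b < 10 ^ conta_digito b := by
  by_cases h : 0 < b
  · rw [conta_digito, if_pos h, pow_succ]
    have ih := lt_pow_conta (PySem.Int.floordiv b 10)
      (by rw [PySem.Int.floordiv_eq_ediv_of_pos (by omega)]; omega)
    rw [PySem.Int.floordiv_eq_ediv_of_pos (by omega)] at ih ⊢
    omega
  · rw [conta_digito, if_neg h]; omega
termination_by b.toNat
decreasing_by
  simp only [PySem.Int.floordiv_eq_ediv_of_pos (show (0:Int) < 10 by norm_num)]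
  omega

-- base-10 decomposition of a modulus: a % (10*m) = a % 10 + 10 * ((a/10) % m)
theorem emod_ten_mul (a m : Int) (hm : 0 < m) :
    a % (10 * m) = a % 10 + 10 * ((a / 10) % m) := by
  have e1 := Int.mul_ediv_add_emod a 10
  have e2 := Int.mul_ediv_add_emod (a / 10) m
  have hr1 := Int.emod_nonneg a (show (10:Int) ≠ 0 by norm_num)
  have hr2 := Int.emod_lt_of_pos a (show (0:Int) < 10 by norm_num)
  have hq1 := Int.emod_nonneg (a / 10) (show m ≠ 0 by omega)
  have hq2 := Int.emod_lt_of_pos (a / 10) hm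
  have key : a = (a % 10 + 10 * ((a / 10) % m)) + 10 * m * (a / 10 / m) := by
    linear_combination (-1 : Int) * e1 - 10 * e2
  conv_lhs => rw [key]
  rw [Int.add_mul_emod_self_left]
  exact Int.emod_eq_of_lt (by omega) (by omega)

-- the peel loop computes exactly A's big-modulo test, for b ≥ 0.
theorem peel_eq (a b : Int) (hb : 0 ≤ b) :
    encaixa_peel a b = decide (a % 10 ^ conta_digito b = b) := by
  by_cases h : 0 < b
  · rw [encaixa_peel, if_pos h, conta_digito, if_pos h]
    have h10 : (0:Int) < 10 := by norm_num
    rw [PySem.Int.mod_eq_emod_of_pos h10, PySem.Int.mod_eq_emod_of_pos h10,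
        PySem.Int.floordiv_eq_ediv_of_pos h10, PySem.Int.floordiv_eq_ediv_of_pos h10]
    have hb10 : 0 ≤ b / 10 := by omega
    have ih := peel_eq (a / 10) (b / 10) hb10
    set k := conta_digito (b / 10) with hk
    have hm : (0:Int) < 10 ^ k := by positivity
    have hdec := emod_ten_mul a (10 ^ k) hm
    have hblt : b / 10 < 10 ^ k := lt_pow_conta (b / 10) hb10
    have hbdec : b = 10 * (b / 10) + b % 10 := (Int.mul_ediv_add_emod b 10).symm
    have hbr1 := Int.emod_nonneg b (show (10:Int) ≠ 0 by norm_num)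
    have hbr2 := Int.emod_lt_of_pos b h10
    have har1 := Int.emod_nonneg a (show (10:Int) ≠ 0 by norm_num)
    have har2 := Int.emod_lt_of_pos a h10
    have haq1 := Int.emod_nonneg (a / 10) (show (10:Int) ^ k ≠ 0 by omega)
    have haq2 := Int.emod_lt_of_pos (a / 10) hm
    rw [pow_succ, mul_comm ((10:Int) ^ k) 10]
    by_cases hd : a % 10 ≠ b % 10
    · rw [if_pos hd]
      have hne : ¬ a % (10 * 10 ^ k) = b := by omega
      simp [hne]
    · rw [if_neg hd, ih]
      have hiff : (a % (10 * 10 ^ k) = b) ↔ ((a / 10) % 10 ^ k = b / 10) := by omega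
      simp [hiff]
  · have hb0 : b = 0 := by omega
    subst hb0
    rw [encaixa_peel, if_neg h, conta_digito, if_neg h]
    norm_num
termination_by b.toNat
decreasing_by omega

-- ===== VERDICT (by name: the statement is the Claim_ definition above) =====
theorem encaixa_spec : Claim_equal_encaixa := by
  intro a b _
  unfold Spec_encaixa encaixa_alt
  by_cases hneg : b < 0
  · -- A: conta_digito b = 0, a % 1 = 0 ≠ b; B: the negative guard
    rw [if_pos hneg]
    have hc : conta_digito b = 0 := by rw [conta_digito, if_neg (by omega)]
    show (if PySem.Int.mod a (10 ^ conta_digito b) = b then true else false) = false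
    rw [hc, pow_zero]
    have hz : PySem.Int.mod a 1 = 0 := by
      rw [PySem.Int.mod_eq_emod_of_pos (by norm_num)]; simp
    rw [hz, if_neg (by omega)]
  · rw [if_neg hneg, peel_eq a b (by omega)]
    have hm : (0:Int) < 10 ^ conta_digito b := by positivity
    show (if PySem.Int.mod a (10 ^ conta_digito b) = b then true else false) = _
    rw [PySem.Int.mod_eq_emod_of_pos hm]
    by_cases h : a % 10 ^ conta_digito b = b
    · rw [if_pos h]; simp [h]
    · rw [if_neg h]; simp [h]
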